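-- pv_equiv track=rewrite | github.com/alishalabi/practice_2024 | coding_problems/rearrange_the_number.py | rearranged_difference
-- ===== SOURCE A (Python) =====
-- def rearranged_difference(number):
--     number_dict = {}
--     pre_sorted_keys = []
--     for digit in str(number):
--         if digit not in pre_sorted_keys:
--             pre_sorted_keys.append(digit)
--         if digit not in number_dict:
--             number_dict[digit] = 1
--         else:
--             number_dict[digit] += 1
--     sorted_keys = sorted(pre_sorted_keys)
--     lowest_number = ""
--     highest_number = ""
--     for key in sorted_keys:
--         lowest_number += (key * number_dict[key])
--         highest_number = (key * number_dict[key]) + highest_number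
--     ret = int(highest_number) - int(lowest_number)
--     return ret
-- ===== SOURCE B (Python) =====
-- def rearranged_difference(number):
--     s = sorted(str(number))
--     return int("".join(reversed(s))) - int("".join(s))
-- ===== Notes on version B (the rewrite author's own statement) =====
-- stated objective: simpler
-- what changed: B sorts the digit characters of str(number) directly and reads the lowest/highest permutations off as the sorted string and its reverse, dropping A's frequency dict, unique-key list and chunk-by-chunk string building.
import Mathlib
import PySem

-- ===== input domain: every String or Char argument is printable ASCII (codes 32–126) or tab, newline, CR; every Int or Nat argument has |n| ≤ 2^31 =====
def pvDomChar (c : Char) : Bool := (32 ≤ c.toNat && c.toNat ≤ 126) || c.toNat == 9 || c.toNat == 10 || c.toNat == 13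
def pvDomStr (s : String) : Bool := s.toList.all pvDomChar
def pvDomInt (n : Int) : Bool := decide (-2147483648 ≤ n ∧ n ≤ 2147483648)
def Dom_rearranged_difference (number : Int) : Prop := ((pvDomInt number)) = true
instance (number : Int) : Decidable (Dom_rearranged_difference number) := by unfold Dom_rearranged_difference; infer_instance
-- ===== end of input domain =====

-- B replaces A's digit-frequency dict and unique-key list by sorting the digit characters directly
-- (lowest = sorted string, highest = its reverse): a simpler algorithm, same return value.

-- ===== PORT A =====
def rearranged_difference (number : Int) : Int :=
  -- for digit in str(number): maintain (number_dict, pre_sorted_keys)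
  let st := (PySem.Int.toChars number).foldl
    (fun (st : PySem.Dict Char Int × List Char) digit =>
      let keys := if st.2.contains digit then st.2 else st.2 ++ [digit]
      let d := if st.1.contains digit then st.1.modify digit 0 (· + 1) else st.1.insert digit 1
      (d, keys))
    (PySem.Dict.empty, [])
  let sorted_keys := PySem.List.sorted st.2 (fun x => x) false
  -- for key in sorted_keys: lowest += key*cnt; highest = key*cnt + highest
  let lh := sorted_keys.foldl
    (fun (p : List Char × List Char) key =>
      let chunk := List.replicate (st.1.getD key 0).toNat key  -- key * number_dict[key]; key is always present
      (p.1 ++ chunk, chunk ++ p.2))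
    ([], [])
  (PySem.Int.ofChars? lh.2).getD 0 - (PySem.Int.ofChars? lh.1).getD 0  -- int() raises only outside Pre_

-- ===== PORT B =====
def rearranged_difference_alt (number : Int) : Int :=
  let s := PySem.List.sorted (PySem.Int.toChars number) (fun x => x) false
  (PySem.Int.ofChars? s.reverse).getD 0 - (PySem.Int.ofChars? s).getD 0  -- int() raises only outside Pre_

-- ===== PRECONDITION & SPEC =====
-- Pre_ excludes negative numbers: there str(number) carries '-', int(highest_number) gets a trailing
-- '-' and Python A raises ValueError (B raises the same way).
def Pre_rearranged_difference (number : Int) : Prop := 0 ≤ number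
instance (number : Int) : Decidable (Pre_rearranged_difference number) := by unfold Pre_rearranged_difference; infer_instance
def pvWitness_rearranged_difference : Int := 907

def Spec_rearranged_difference (number : Int) (out : Int) : Prop := out = rearranged_difference_alt number
instance (number : Int) (out : Int) : Decidable (Spec_rearranged_difference number out) := by unfold Spec_rearranged_difference; infer_instance

-- ===== CLAIM (what is proved, stated in full; the proofs are below) =====
def Claim_equal_rearranged_difference : Prop := ∀ (number : Int), Dom_rearranged_difference number → Pre_rearranged_difference number → Spec_rearranged_difference number (rearranged_difference number)

-- ===== LEMMAS AND PROOFS =====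

-- A's dict-update branch is exactly Counter's update step.
theorem stepA_eq_modify (d : PySem.Dict Char Int) (x : Char) :
    (if d.contains x then d.modify x 0 (· + 1) else d.insert x 1)
      = d.modify x 0 (· + 1) := by
  by_cases h : d.contains x
  · simp [h]
  · have hf : d.items.find? (fun p => p.1 == x) = none := by
      rw [List.find?_eq_none]
      intro p hp
      simp only [PySem.Dict.contains, List.any_eq_true, not_exists, not_and] at h
      exact h p hp
    simp [h, PySem.Dict.modify, PySem.Dict.getD, PySem.Dict.get?, hf]

-- A's first loop computes (Counter(str(number)), dict.fromkeys-style dedup of its chars).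
theorem loop1_eq (ds : List Char) :
    ds.foldl
      (fun (st : PySem.Dict Char Int × List Char) digit =>
        let keys := if st.2.contains digit then st.2 else st.2 ++ [digit]
        let d := if st.1.contains digit then st.1.modify digit 0 (· + 1) else st.1.insert digit 1
        (d, keys))
      (PySem.Dict.empty, [])
      = (PySem.Dict.counter ds, PySem.Set.ofList ds) := by
  rw [show (fun (st : PySem.Dict Char Int × List Char) digit =>
        ((if st.1.contains digit then st.1.modify digit 0 (· + 1) else st.1.insert digit 1),
         (if st.2.contains digit then st.2 else st.2 ++ [digit])))
      = (fun (st : PySem.Dict Char Int × List Char) digit =>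
        (st.1.modify digit 0 (· + 1), PySem.Set.add st.2 digit)) from
    funext fun st => funext fun digit => by
      rw [stepA_eq_modify]; rfl]
  rw [PySem.List.foldl_prod_mk (fun (d : PySem.Dict Char Int) digit => d.modify digit 0 (· + 1))
        PySem.Set.add ds PySem.Dict.empty []]
  rfl

-- A's second loop: lowest is the concatenation of the chunks, highest the reverse-order concatenation.
theorem loop2_eq (c : Char → List Char) (ks : List Char) (p : List Char × List Char) :
    ks.foldl (fun (p : List Char × List Char) key => (p.1 ++ c key, c key ++ p.2)) p
      = (p.1 ++ (ks.map c).flatten, ((ks.map c).reverse).flatten ++ p.2) := by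
  induction ks generalizing p with
  | nil => simp
  | cons k t ih => simp [List.foldl_cons, ih, List.flatten_append]

-- sum of an indicator-weighted map is count * weight (specific shape of A's chunk counting)
theorem sum_map_ite_count (l : List Char) (v : Char) (C : Nat) :
    (l.map (fun k => if k = v then C else 0)).sum = l.count v * C := by
  induction l with
  | nil => simp
  | cons k t ih =>
    by_cases h : k = v
    · subst h; simp [ih, Nat.add_mul, Nat.add_comm]
    · simp [h, ih]

-- The chunks of A, laid out over the sorted distinct digits, rebuild the sorted digit string.
theorem flatten_chunks_eq_sorted (ds : List Char) :
    ((PySem.List.sorted (PySem.Set.ofList ds) (fun x => x) false).map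
        (fun k => List.replicate (List.count k ds) k)).flatten
      = PySem.List.sorted ds (fun x => x) false := by
  set sk := PySem.List.sorted (PySem.Set.ofList ds) (fun x => x) false with hsk
  have hnd : sk.Nodup := (PySem.List.sorted_perm _ _ _).nodup_iff.mpr (PySem.Set.nodup_ofList ds)
  have hlt : sk.Pairwise (· < ·) := PySem.List.sorted_ofList_pairwise_lt ds
  have hmem : ∀ x, x ∈ sk ↔ x ∈ ds := by
    intro x
    rw [hsk, PySem.List.mem_sorted, PySem.Set.mem_ofList]
  symm
  apply PySem.List.sorted_id_eq_of_perm_of_pairwise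
  · -- permutation, by counting each character
    rw [List.perm_iff_count]
    intro v
    rw [List.count_flatten, List.map_map]
    have hterm : ∀ k ∈ sk,
        (List.count v ∘ fun k => List.replicate (List.count k ds) k) k
          = if k = v then List.count v ds else 0 := by
      intro k _
      simp only [Function.comp, List.count_replicate]
      split_ifs with h h2 h3 <;> simp_all
    rw [List.map_congr_left hterm, sum_map_ite_count sk v (List.count v ds)]
    by_cases hv : v ∈ ds
    · rw [List.count_eq_one_of_mem hnd ((hmem v).mpr hv), one_mul]
    · rw [List.count_eq_zero_of_not_mem hv, Nat.mul_zero]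
  · -- sortedness of the flattened chunks
    rw [List.pairwise_flatten]
    constructor
    · intro l hl
      simp only [List.mem_map] at hl
      obtain ⟨k, _, rfl⟩ := hl
      exact List.pairwise_replicate.mpr (Or.inr le_rfl)
    · refine (List.pairwise_map).mpr (hlt.imp ?_)
      intro a b hab x hx y hy
      rw [List.eq_of_mem_replicate hx, List.eq_of_mem_replicate hy]
      exact le_of_lt hab

-- The reverse-order concatenation of the chunks is the reverse of the sorted digit string.
theorem flatten_rev_chunks_eq (ds : List Char) :
    (((PySem.List.sorted (PySem.Set.ofList ds) (fun x => x) false).map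
        (fun k => List.replicate (List.count k ds) k)).reverse).flatten
      = (PySem.List.sorted ds (fun x => x) false).reverse := by
  rw [← flatten_chunks_eq_sorted ds, List.reverse_flatten, List.map_map]
  congr 2
  apply List.map_congr_left
  intro k _
  simp [Function.comp, List.reverse_replicate]

-- ===== VERDICT (by name: the statement is the Claim_ definition above) =====
theorem rearranged_difference_spec : Claim_equal_rearranged_difference := by
  intro number _ _
  unfold Spec_rearranged_difference rearranged_difference rearranged_difference_alt
  simp only [loop1_eq, loop2_eq, List.append_nil, List.nil_append]
  have hmapeq : ((PySem.List.sorted (PySem.Set.ofList (PySem.Int.toChars number)) (fun x => x) false).map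
        (fun k => List.replicate ((PySem.Dict.counter (PySem.Int.toChars number)).getD k 0).toNat k))
      = ((PySem.List.sorted (PySem.Set.ofList (PySem.Int.toChars number)) (fun x => x) false).map
        (fun k => List.replicate (List.count k (PySem.Int.toChars number)) k)) := by
    apply List.map_congr_left
    intro k _
    rw [PySem.Dict.getD_counter, Int.toNat_natCast]
  rw [hmapeq, flatten_chunks_eq_sorted, flatten_rev_chunks_eq]
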